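-- pv_equiv track=rewrite | github.com/TechLannisters/IDPHackathon | preprocess.py | estimate_cells
-- ===== SOURCE A (Python) =====
-- def estimate_cells(horizontal_lines, vertical_lines):
--     #  Sort lines by coordinates for consistency
--     horizontal_lines.sort(key=lambda x: x[0][1])
--     vertical_lines.sort(key=lambda x: x[0][0])
--
--     #  Simple (potential) cell estimation
--     table_cells = []
--     for i in range(len(horizontal_lines) - 1):
--         for j in range(len(vertical_lines) - 1):
--             x1, y1 = vertical_lines[j][0][:2]
--             x2, y2 = vertical_lines[j + 1][0][:2]
--             y3, _ = horizontal_lines[i][0][:2]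
--             y4, _ = horizontal_lines[i + 1][0][:2]
--             table_cells.append((x1, y3, x2 - x1, y4 - y3))
--
--     return table_cells
-- ===== SOURCE B (Python) =====
-- def estimate_cells(horizontal_lines, vertical_lines):
--     # Same in-place sorts as the original (callers may observe the mutation)
--     horizontal_lines.sort(key=lambda x: x[0][1])
--     vertical_lines.sort(key=lambda x: x[0][0])
--     return _rows(horizontal_lines, vertical_lines)
--
--
-- def _rows(hs, vs):
--     # Recurse over consecutive horizontal pairs; no indices, no ranges.
--     if len(hs) < 2:
--         return []
--     y3 = hs[0][0][0]
--     y4 = hs[1][0][0]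
--     return _cols(vs, y3, y4 - y3) + _rows(hs[1:], vs)
--
--
-- def _cols(vs, y3, h):
--     # Recurse over consecutive vertical pairs, cons-building one row of cells.
--     if len(vs) < 2:
--         return []
--     x1 = vs[0][0][0]
--     x2 = vs[1][0][0]
--     return [(x1, y3, x2 - x1, h)] + _cols(vs[1:], y3, h)
-- ===== Notes on version B (the rewrite author's own statement) =====
-- stated objective: alternative
-- what changed: B replaces A's nested index loops over range(len-1) with structural recursion over the sorted lists themselves: an outer recursion peeling consecutive horizontal pairs and an inner recursion peeling consecutive vertical pairs, cons-building each row and concatenating, with no indexing arithmetic.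
-- outside the precondition, e.g. on estimate_cells([[[0, 0]], [[0, 5]]], [[[1]], [[3]]]): A raises ValueError, B returns [(1, 0, 2, 0)]
-- crash fix: When both lists have at least two lines, every sort key exists, and some vertical line's first point has exactly one coordinate, A raises ValueError unpacking the 1-element slice while B returns the cells built from the first coordinates. — e.g. on estimate_cells([[[0, 0]], [[0, 5]]], [[[1]], [[3]]]): A raises ValueError, B returns [(1, 0, 2, 0)]
import Mathlib
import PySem

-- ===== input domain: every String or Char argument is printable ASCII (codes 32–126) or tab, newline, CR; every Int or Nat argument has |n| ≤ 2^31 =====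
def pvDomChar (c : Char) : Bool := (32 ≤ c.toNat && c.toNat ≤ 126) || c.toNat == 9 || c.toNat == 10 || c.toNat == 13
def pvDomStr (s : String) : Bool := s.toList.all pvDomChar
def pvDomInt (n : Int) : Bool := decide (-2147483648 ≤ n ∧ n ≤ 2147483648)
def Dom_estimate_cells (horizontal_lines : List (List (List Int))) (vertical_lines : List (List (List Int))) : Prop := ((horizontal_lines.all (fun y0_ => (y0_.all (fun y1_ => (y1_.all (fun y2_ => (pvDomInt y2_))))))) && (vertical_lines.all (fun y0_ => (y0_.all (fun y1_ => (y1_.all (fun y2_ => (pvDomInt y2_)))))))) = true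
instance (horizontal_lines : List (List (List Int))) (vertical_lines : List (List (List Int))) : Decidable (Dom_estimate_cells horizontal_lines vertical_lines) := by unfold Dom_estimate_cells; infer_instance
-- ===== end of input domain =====

-- B replaces A's nested index loops with structural recursion over the sorted lists
-- (peel consecutive pairs, cons-build each row) — an alternative decomposition, not faster.
-- Both A and B sort their two list arguments in place with the same keys; the theorems
-- below are about the return value (the mutation is identical in A and B).

-- ===== PORT A =====
-- The sort keys x[0][1] / x[0][0] and the slice-unpacks exist on every input admitted by
-- Pre_estimate_cells, so the `headD []`/`getD _ 0` defaults below are never taken there.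
def estimate_cells (horizontal_lines : List (List (List Int))) (vertical_lines : List (List (List Int))) : List (Int × Int × Int × Int) :=
  let H := PySem.List.sorted horizontal_lines (fun x => (x.headD []).getD 1 0)
  let V := PySem.List.sorted vertical_lines (fun x => (x.headD []).getD 0 0)
  (PySem.List.pyRange 0 ((H.length : Int) - 1)).foldl (fun acc i =>
    (PySem.List.pyRange 0 ((V.length : Int) - 1)).foldl (fun acc j =>
      -- x1, y1 = vertical_lines[j][0][:2]  (y1 unused); etc.
      let x1 := ((PySem.List.pyGetD V j []).headD []).getD 0 0
      let x2 := ((PySem.List.pyGetD V (j + 1) []).headD []).getD 0 0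
      let y3 := ((PySem.List.pyGetD H i []).headD []).getD 0 0
      let y4 := ((PySem.List.pyGetD H (i + 1) []).headD []).getD 0 0
      acc ++ [(x1, y3, x2 - x1, y4 - y3)]) acc) []

-- ===== PORT B =====
-- _cols: recursion over consecutive vertical pairs, cons-building one row.
def pvCols : List (List (List Int)) → Int → Int → List (Int × Int × Int × Int)
  | a :: b :: rest, y3, h =>
    let x1 := (a.headD []).getD 0 0
    let x2 := (b.headD []).getD 0 0
    (x1, y3, x2 - x1, h) :: pvCols (b :: rest) y3 h
  | _, _, _ => []

-- _rows: recursion over consecutive horizontal pairs, concatenating rows.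
def pvRows : List (List (List Int)) → List (List (List Int)) → List (Int × Int × Int × Int)
  | a :: b :: rest, vs =>
    let y3 := (a.headD []).getD 0 0
    let y4 := (b.headD []).getD 0 0
    pvCols vs y3 (y4 - y3) ++ pvRows (b :: rest) vs
  | _, _ => []

def estimate_cells_alt (horizontal_lines : List (List (List Int))) (vertical_lines : List (List (List Int))) : List (Int × Int × Int × Int) :=
  let H := PySem.List.sorted horizontal_lines (fun x => (x.headD []).getD 1 0)
  let V := PySem.List.sorted vertical_lines (fun x => (x.headD []).getD 0 0)
  pvRows H V

-- ===== PRECONDITION & SPEC =====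
-- Pre_ excludes exactly the inputs where Python A raises: a horizontal line whose first
-- point lacks a second coordinate (IndexError in the sort key), a vertical line with an
-- empty point list / empty first point (IndexError in the sort key), and — when both lists
-- have ≥ 2 lines, so the loops run — a vertical first point with fewer than two
-- coordinates (ValueError unpacking the slice).
def Pre_estimate_cells (horizontal_lines : List (List (List Int))) (vertical_lines : List (List (List Int))) : Prop :=
  (∀ l ∈ horizontal_lines, 2 ≤ (l.headD []).length) ∧
  (∀ l ∈ vertical_lines, 1 ≤ (l.headD []).length) ∧
  (2 ≤ horizontal_lines.length → 2 ≤ vertical_lines.length →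
    ∀ l ∈ vertical_lines, 2 ≤ (l.headD []).length)
instance (horizontal_lines : List (List (List Int))) (vertical_lines : List (List (List Int))) : Decidable (Pre_estimate_cells horizontal_lines vertical_lines) := by unfold Pre_estimate_cells; infer_instance

def pvWitness_estimate_cells : List (List (List Int)) × List (List (List Int)) :=
  ([[[0, 0]], [[0, 5]]], [[[1, 2]], [[3, 4]]])

-- When both lists have at least two lines, every sort key exists, and some vertical line's
-- first point has exactly one coordinate, A raises ValueError unpacking the 1-element
-- slice while B returns the cells built from the first coordinates.
def Raises_estimate_cells (horizontal_lines : List (List (List Int))) (vertical_lines : List (List (List Int))) : Prop :=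
  (∀ l ∈ horizontal_lines, 2 ≤ (l.headD []).length) ∧
  (∀ l ∈ vertical_lines, 1 ≤ (l.headD []).length) ∧
  2 ≤ horizontal_lines.length ∧ 2 ≤ vertical_lines.length ∧
  ∃ l ∈ vertical_lines, (l.headD []).length = 1
instance (horizontal_lines : List (List (List Int))) (vertical_lines : List (List (List Int))) : Decidable (Raises_estimate_cells horizontal_lines vertical_lines) := by unfold Raises_estimate_cells; infer_instance

def pvRaiseWitness_estimate_cells : List (List (List Int)) × List (List (List Int)) :=
  ([[[0, 0]], [[0, 5]]], [[[1]], [[3]]])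
def pvRaiseWitnessOut_estimate_cells : List (Int × Int × Int × Int) := [(1, 0, 2, 0)]

def Spec_estimate_cells (horizontal_lines : List (List (List Int))) (vertical_lines : List (List (List Int))) (out : List (Int × Int × Int × Int)) : Prop := out = estimate_cells_alt horizontal_lines vertical_lines
instance (horizontal_lines : List (List (List Int))) (vertical_lines : List (List (List Int))) (out : List (Int × Int × Int × Int)) : Decidable (Spec_estimate_cells horizontal_lines vertical_lines out) := by unfold Spec_estimate_cells; infer_instance

-- ===== CLAIM (what is proved, stated in full; the proofs are below) =====
def Claim_equal_estimate_cells : Prop := ∀ (horizontal_lines : List (List (List Int))) (vertical_lines : List (List (List Int))), Dom_estimate_cells horizontal_lines vertical_lines → Pre_estimate_cells horizontal_lines vertical_lines → Spec_estimate_cells horizontal_lines vertical_lines (estimate_cells horizontal_lines vertical_lines)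

def Claim_raises_estimate_cells : Prop := (∀ (horizontal_lines : List (List (List Int))) (vertical_lines : List (List (List Int))), Dom_estimate_cells horizontal_lines vertical_lines → Raises_estimate_cells horizontal_lines vertical_lines → ¬ Pre_estimate_cells horizontal_lines vertical_lines) ∧ (Dom_estimate_cells (pvRaiseWitness_estimate_cells.1) (pvRaiseWitness_estimate_cells.2) ∧ Raises_estimate_cells (pvRaiseWitness_estimate_cells.1) (pvRaiseWitness_estimate_cells.2) ∧ estimate_cells_alt (pvRaiseWitness_estimate_cells.1) (pvRaiseWitness_estimate_cells.2) = pvRaiseWitnessOut_estimate_cells)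

-- ===== LEMMAS AND PROOFS =====

-- pvCols, characterised as a map over the index range of consecutive pairs.
lemma pvCols_eq (y3 h : Int) : ∀ (V : List (List (List Int))),
    pvCols V y3 h = (List.range (V.length - 1)).map (fun j =>
      (((V.getD j []).headD []).getD 0 0, y3,
       ((V.getD (j + 1) []).headD []).getD 0 0 - ((V.getD j []).headD []).getD 0 0, h))
  | [] => by simp [pvCols]
  | [a] => by simp [pvCols]
  | a :: b :: rest => by
    have ih := pvCols_eq y3 h (b :: rest)
    simp only [pvCols, ih, List.length_cons]
    have hlen : (rest.length + 1 + 1) - 1 = rest.length + 1 := by omega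
    rw [hlen, List.range_succ_eq_map]
    simp [List.map_map, Function.comp]

-- pvRows, characterised as a flatMap over the index range of consecutive horizontal pairs.
lemma pvRows_eq (V : List (List (List Int))) : ∀ (H : List (List (List Int))),
    pvRows H V = (List.range (H.length - 1)).flatMap (fun i =>
      pvCols V (((H.getD i []).headD []).getD 0 0)
        (((H.getD (i + 1) []).headD []).getD 0 0 - ((H.getD i []).headD []).getD 0 0))
  | [] => by simp [pvRows]
  | [a] => by simp [pvRows]
  | a :: b :: rest => by
    have ih := pvRows_eq V (b :: rest)
    simp only [pvRows, ih, List.length_cons]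
    have hlen : (rest.length + 1 + 1) - 1 = rest.length + 1 := by omega
    rw [hlen, List.range_succ_eq_map, List.flatMap_cons, List.flatMap_map]
    simp

-- The two post-sort passes agree for arbitrary lists H, V.
lemma loops_eq (H V : List (List (List Int))) :
    (PySem.List.pyRange 0 ((H.length : Int) - 1)).foldl (fun acc i =>
      (PySem.List.pyRange 0 ((V.length : Int) - 1)).foldl (fun acc j =>
        acc ++ [(((PySem.List.pyGetD V j []).headD []).getD 0 0,
                 ((PySem.List.pyGetD H i []).headD []).getD 0 0,
                 ((PySem.List.pyGetD V (j + 1) []).headD []).getD 0 0 -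
                   ((PySem.List.pyGetD V j []).headD []).getD 0 0,
                 ((PySem.List.pyGetD H (i + 1) []).headD []).getD 0 0 -
                   ((PySem.List.pyGetD H i []).headD []).getD 0 0)]) acc) []
      = pvRows H V := by
  have hH : (((H.length : Int) - 1) - 0).toNat = H.length - 1 := by omega
  have hV : (((V.length : Int) - 1) - 0).toNat = V.length - 1 := by omega
  rw [PySem.List.pyRange_one, PySem.List.pyRange_one, hH, hV]
  simp only [List.foldl_map, PySem.List.foldl_append_singleton_eq_map,
    PySem.List.foldl_append_eq_flatMap, List.nil_append]
  rw [pvRows_eq]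
  apply List.flatMap_congr
  intro i _
  rw [pvCols_eq]
  apply List.map_congr_left
  intro j _
  have c2 : ((j : Int) + 1) = (((j + 1 : Nat)) : Int) := by push_cast; ring
  have c4 : ((i : Int) + 1) = (((i + 1 : Nat)) : Int) := by push_cast; ring
  simp only [zero_add, c2, c4, PySem.List.pyGetD_natCast]

-- ===== VERDICT (by name: the statement is the Claim_ definition above) =====
theorem estimate_cells_spec : Claim_equal_estimate_cells := by
  intro hl vl _ _
  show estimate_cells hl vl = estimate_cells_alt hl vl
  unfold estimate_cells estimate_cells_alt
  exact loops_eq _ _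

@[simp] theorem estimate_cells_raises : Claim_raises_estimate_cells := by
  unfold Claim_raises_estimate_cells
  refine ⟨?_, by decide⟩
  intro hl vl _ hr hp
  obtain ⟨_, _, _, hv2, l, hl2, hlen⟩ := hr
  have := hp.2.2 (by omega) hv2 l hl2
  omega
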